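-- pv_equiv track=rewrite | github.com/SotirisKav/music-festival | code/fake_data.py | has_more_than_3_consecutive_years
-- ===== SOURCE A (Python) =====
-- def has_more_than_3_consecutive_years(years_set, current_year):
--     years = sorted(years_set | {current_year})
--     count = 1
--     for i in range(1, len(years)):
--         if years[i] == years[i - 1] + 1:
--             count += 1
--             if count > 3:
--                 return True
--         else:
--             count = 1
--     return False
-- ===== SOURCE B (Python) =====
-- def has_more_than_3_consecutive_years(years_set, current_year):
--     s = years_set | {current_year}
--     return any(y + 1 in s and y + 2 in s and y + 3 in s for y in s)
-- ===== Notes on version B (the rewrite author's own statement) =====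
-- stated objective: alternative
-- what changed: replaces sorting the set and scanning adjacent differences with a run counter by direct set-membership tests: some year with the next three years also in the set
import Mathlib
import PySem

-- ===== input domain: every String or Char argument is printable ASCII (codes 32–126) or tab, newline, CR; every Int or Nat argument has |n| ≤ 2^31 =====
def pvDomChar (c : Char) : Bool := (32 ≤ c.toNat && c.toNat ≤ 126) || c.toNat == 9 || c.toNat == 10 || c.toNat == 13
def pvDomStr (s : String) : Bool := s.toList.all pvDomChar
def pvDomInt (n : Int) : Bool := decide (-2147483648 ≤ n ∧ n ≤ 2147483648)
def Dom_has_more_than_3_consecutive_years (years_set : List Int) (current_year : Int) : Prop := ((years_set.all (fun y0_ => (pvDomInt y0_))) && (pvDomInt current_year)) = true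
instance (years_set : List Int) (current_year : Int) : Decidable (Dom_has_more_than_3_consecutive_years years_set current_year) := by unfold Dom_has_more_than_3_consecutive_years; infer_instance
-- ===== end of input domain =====

-- B replaces A's sort-then-scan with direct set-membership tests (any y with y+1,y+2,y+3 in the set); equal return value on nodup inputs.

-- ===== PORT A =====
def has_more_than_3_consecutive_years (years_set : List Int) (current_year : Int) : Bool :=
  let years := PySem.List.sorted (PySem.Set.union years_set [current_year]) (fun x => x) false
  let st := (PySem.List.pyRange 1 (PySem.List.len years) 1).foldl
    (fun (st : Bool × Int) i =>
      if st.1 then st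
      else if PySem.List.pyGetD years i 0 == PySem.List.pyGetD years (i-1) 0 + 1 then
        (decide (st.2 + 1 > 3), st.2 + 1)
      else (false, 1))
    (false, 1)
  st.1

-- ===== PORT B =====
def has_more_than_3_consecutive_years_alt (years_set : List Int) (current_year : Int) : Bool :=
  let s := PySem.Set.union years_set [current_year]
  s.any (fun y =>
    PySem.Set.contains s (y + 1) && PySem.Set.contains s (y + 2) && PySem.Set.contains s (y + 3))

-- ===== PRECONDITION & SPEC =====
-- years_set is a Python set, so under the type convention it arrives as a list of DISTINCT elements;
-- Pre_ states exactly that (it excludes no input a Python caller of A can produce).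
def Pre_has_more_than_3_consecutive_years (years_set : List Int) (current_year : Int) : Prop :=
  years_set.Nodup
instance (years_set : List Int) (current_year : Int) : Decidable (Pre_has_more_than_3_consecutive_years years_set current_year) := by unfold Pre_has_more_than_3_consecutive_years; infer_instance
def pvWitness_has_more_than_3_consecutive_years : List Int × Int := ([2010, 2012, 2011], 2013)
def Spec_has_more_than_3_consecutive_years (years_set : List Int) (current_year : Int) (out : Bool) : Prop := out = has_more_than_3_consecutive_years_alt years_set current_year
instance (years_set : List Int) (current_year : Int) (out : Bool) : Decidable (Spec_has_more_than_3_consecutive_years years_set current_year out) := by unfold Spec_has_more_than_3_consecutive_years; infer_instance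

-- ===== CLAIM (what is proved, stated in full; the proofs are below) =====
def Claim_equal_has_more_than_3_consecutive_years : Prop := ∀ (years_set : List Int) (current_year : Int), Dom_has_more_than_3_consecutive_years years_set current_year → Pre_has_more_than_3_consecutive_years years_set current_year → Spec_has_more_than_3_consecutive_years years_set current_year (has_more_than_3_consecutive_years years_set current_year)

-- ===== LEMMAS AND PROOFS =====

-- the scan over adjacent pairs that A's index loop performs (proof-side helper)
def scanPairs : List (Int × Int) → Int → Bool
  | [], _ => false
  | (p, c) :: rest, cnt =>
      if c == p + 1 then (if cnt + 1 > 3 then true else scanPairs rest (cnt + 1))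
      else scanPairs rest 1

-- A's loop body
def bodyA (st : Bool × Int) (p c : Int) : Bool × Int :=
  if st.1 then st
  else if c == p + 1 then (decide (st.2 + 1 > 3), st.2 + 1)
  else (false, 1)

-- once the flag is set the fold keeps it
lemma foldl_bodyA_true (ps : List (Int × Int)) (cnt : Int) :
    (ps.foldl (fun st q => bodyA st q.1 q.2) (true, cnt)).1 = true := by
  induction ps generalizing cnt with
  | nil => rfl
  | cons q ps ih => simpa [bodyA] using ih cnt

lemma foldl_bodyA_eq_scanPairs (ps : List (Int × Int)) (cnt : Int) :
    (ps.foldl (fun st q => bodyA st q.1 q.2) (false, cnt)).1 = scanPairs ps cnt := by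
  induction ps generalizing cnt with
  | nil => rfl
  | cons q ps ih =>
      obtain ⟨p, c⟩ := q
      by_cases h : c = p + 1
      · subst h
        by_cases h4 : cnt + 1 > 3
        · have hb : bodyA (false, cnt) p (p + 1) = (true, cnt + 1) := by
            simp [bodyA]; omega
          simp only [List.foldl_cons, hb, scanPairs]
          simp [h4, foldl_bodyA_true]
        · have hb : bodyA (false, cnt) p (p + 1) = (false, cnt + 1) := by
            simp [bodyA]; omega
          simp only [List.foldl_cons, hb, scanPairs]
          simp [h4, ih]
      · have hb : bodyA (false, cnt) p c = (false, 1) := by simp [bodyA, h]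
        simp only [List.foldl_cons, hb, scanPairs]
        simp [h, ih]

-- the index loop over range(1, len(xs)) IS the scan over adjacent pairs
lemma getD_drop_pv (xs : List Int) (k j : Nat) : (xs.drop k).getD j 0 = xs.getD (k + j) 0 := by
  simp [List.getD, List.getElem?_drop]

lemma pyRange_fold_eq_zip_fold (t xs : List Int) (k : Nat) (hk : xs.drop k = t)
    (f : (Bool × Int) → Int → Int → (Bool × Int)) (init : Bool × Int) :
    (PySem.List.pyRange ((k : Int) + 1) (PySem.List.len xs) 1).foldl
      (fun st i => f st (PySem.List.pyGetD xs (i - 1) 0) (PySem.List.pyGetD xs i 0)) init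
    = (t.zip t.tail).foldl (fun st q => f st q.1 q.2) init := by
  induction t generalizing k init with
  | nil =>
      have hlen : xs.length ≤ k := by
        by_contra h
        have := List.drop_eq_nil_iff.mp hk
        omega
      rw [PySem.List.pyRange_one_eq_nil (by simp [PySem.List.len_eq]; omega)]
      rfl
  | cons a t ih =>
      have hk1 : k < xs.length := by
        by_contra h
        simp [List.drop_eq_nil_of_le (by omega : xs.length ≤ k)] at hk
      have ha : xs.getD k 0 = a := by
        have : (xs.drop k).getD 0 0 = a := by rw [hk]; rfl
        simpa [getD_drop_pv] using this
      cases t with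
      | nil =>
          have hlen : xs.length = k + 1 := by
            have := congrArg List.length hk; simp at this; omega
          rw [PySem.List.pyRange_one_eq_nil (by simp [PySem.List.len_eq]; omega)]
          rfl
      | cons b t' =>
          have hk2 : k + 1 < xs.length := by
            have := congrArg List.length hk; simp at this; omega
          have hb : xs.getD (k + 1) 0 = b := by
            have : (xs.drop k).getD 1 0 = b := by rw [hk]; rfl
            simpa [getD_drop_pv] using this
          rw [PySem.List.pyRange_one_cons (by simp [PySem.List.len_eq]; push_cast; omega)]
          simp only [List.foldl_cons]
          have e1 : PySem.List.pyGetD xs ((k : Int) + 1 - 1) 0 = a := by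
            simpa [PySem.List.pyGetD_natCast] using ha
          have e2 : PySem.List.pyGetD xs ((k : Int) + 1) 0 = b := by
            have hc : ((k : Int) + 1) = ((k + 1 : Nat) : Int) := by push_cast; ring
            rw [hc, PySem.List.pyGetD_natCast]; exact hb
          rw [e1, e2]
          have hdrop : xs.drop (k + 1) = b :: t' := by
            have := congrArg (List.drop 1) hk
            simpa [List.drop_drop, Nat.add_comm] using this
          have hih := ih (k + 1) hdrop (f init a b)
          have hcast : ((k + 1 : Nat) : Int) + 1 = (k : Int) + 1 + 1 := by push_cast; ring
          rw [hcast] at hih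
          simpa using hih

-- step at index i: l[i+1] = l[i] + 1  (getD with default 0; every use is guarded by a length bound)
def stepAt (l : List Int) (i : Nat) : Prop := l.getD (i + 1) 0 = l.getD i 0 + 1

-- the first m steps all hold
def firstSteps (l : List Int) (m : Nat) : Prop := m < l.length ∧ ∀ j < m, stepAt l j

-- somewhere three consecutive steps hold
def idx4 (l : List Int) : Prop := ∃ i : Nat, i + 3 < l.length ∧ stepAt l i ∧ stepAt l (i + 1) ∧ stepAt l (i + 2)

lemma firstSteps_mono {l : List Int} {m m' : Nat} (h : m ≤ m') (hf : firstSteps l m') : firstSteps l m :=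
  ⟨lt_of_le_of_lt h hf.1, fun j hj => hf.2 j (lt_of_lt_of_le hj h)⟩

lemma stepAt_cons (x : Int) (l : List Int) (j : Nat) : stepAt (x :: l) (j + 1) ↔ stepAt l j := by
  simp [stepAt]

lemma idx4_cons (x : Int) (l : List Int) :
    idx4 (x :: l) ↔ (3 < l.length + 1 ∧ stepAt (x :: l) 0 ∧ stepAt l 0 ∧ stepAt l 1) ∨ idx4 l := by
  constructor
  · rintro ⟨i, hlen, h0, h1, h2⟩
    cases i with
    | zero =>
        exact Or.inl ⟨by simpa using hlen, h0, (stepAt_cons ..).mp h1, (stepAt_cons ..).mp h2⟩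
    | succ i =>
        exact Or.inr ⟨i, by simp at hlen; omega, (stepAt_cons ..).mp h0,
          (stepAt_cons ..).mp h1, (stepAt_cons ..).mp h2⟩
  · rintro (⟨hlen, h0, h1, h2⟩ | ⟨i, hlen, h0, h1, h2⟩)
    · exact ⟨0, by simpa using hlen, h0, (stepAt_cons ..).mpr h1, (stepAt_cons ..).mpr h2⟩
    · exact ⟨i + 1, by simp; omega, (stepAt_cons ..).mpr h0,
        (stepAt_cons ..).mpr h1, (stepAt_cons ..).mpr h2⟩

lemma firstSteps_cons {x y : Int} {t : List Int} (hy : stepAt (x :: y :: t) 0) (m : Nat) (hm : 1 ≤ m) :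
    firstSteps (x :: y :: t) m ↔ firstSteps (y :: t) (m - 1) := by
  unfold firstSteps
  constructor
  · rintro ⟨hl, hs⟩
    exact ⟨by simp at hl ⊢; omega, fun j hj => (stepAt_cons ..).mp (hs (j + 1) (by omega))⟩
  · rintro ⟨hl, hs⟩
    refine ⟨by simp at hl ⊢; omega, fun j hj => ?_⟩
    cases j with
    | zero => exact hy
    | succ j => exact (stepAt_cons ..).mpr (hs j (by omega))

lemma idx4_of_firstSteps3 {l : List Int} (h : firstSteps l 3) : idx4 l :=
  ⟨0, h.1, h.2 0 (by omega), h.2 1 (by omega), h.2 2 (by omega)⟩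

lemma scanPairs_iff (l : List Int) (m : Nat) (hm1 : 1 ≤ m) (hm3 : m ≤ 3) :
    scanPairs (l.zip l.tail) (4 - (m : Int)) = true ↔ firstSteps l m ∨ idx4 l := by
  induction l generalizing m with
  | nil => simp [scanPairs, firstSteps, idx4]
  | cons x l ih =>
      cases l with
      | nil =>
          simp only [List.tail_cons, List.zip_nil_right, scanPairs]
          constructor
          · intro h; cases h
          · rintro (⟨hl, _⟩ | ⟨i, hl, _⟩) <;> simp at hl <;> omega
      | cons y t =>
          simp only [List.tail_cons, List.zip_cons_cons, scanPairs]
          by_cases hy : y = x + 1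
          · have hstep0 : stepAt (x :: y :: t) 0 := by simp [stepAt, hy]
            have hbeq : (y == x + 1) = true := by simpa using hy
            simp only [hbeq, if_true]
            by_cases hm : m = 1
            · subst hm
              have h31 : (4 : Int) - ((1 : Nat) : Int) + 1 > 3 := by norm_num
              rw [if_pos h31]
              simp only [true_iff]
              exact Or.inl ⟨by simp, fun j hj => by
                have hj0 : j = 0 := by omega
                subst hj0; exact hstep0⟩
            · have hgt : ¬ ((4 : Int) - (m : Int) + 1 > 3) := by
                have : (2 : Nat) ≤ m := by omega
                push_cast; omega
              rw [if_neg hgt]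
              have hc : (4 : Int) - (m : Int) + 1 = 4 - ((m - 1 : Nat) : Int) := by
                push_cast [Nat.cast_sub hm1]; ring
              have ihm := ih (m - 1) (by omega) (by omega)
              simp only [List.tail_cons] at ihm
              rw [hc, ihm]
              constructor
              · rintro (hf | hi)
                · exact Or.inl ((firstSteps_cons hstep0 m hm1).mpr hf)
                · exact Or.inr ((idx4_cons x (y :: t)).mpr (Or.inr hi))
              · rintro (hf | hi)
                · exact Or.inl ((firstSteps_cons hstep0 m hm1).mp hf)
                · rcases (idx4_cons x (y :: t)).mp hi with ⟨hlen, _, h0, h1⟩ | hi2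
                  · have h2 : firstSteps (y :: t) 2 :=
                      ⟨by simp at hlen ⊢; omega, fun j hj => by
                        interval_cases j
                        · exact h0
                        · exact h1⟩
                    exact Or.inl (firstSteps_mono (by omega) h2)
                  · exact Or.inr hi2
          · have hstep0 : ¬ stepAt (x :: y :: t) 0 := by simp [stepAt, hy]
            have hbeq : (y == x + 1) = false := by simpa using hy
            simp only [hbeq, Bool.false_eq_true, if_false]
            have hc : (1 : Int) = 4 - ((3 : Nat) : Int) := by norm_num
            have ihm := ih 3 (by omega) (by omega)
            simp only [List.tail_cons] at ihm
            rw [hc, ihm]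
            constructor
            · rintro (hf | hi)
              · exact Or.inr ((idx4_cons x (y :: t)).mpr (Or.inr (idx4_of_firstSteps3 hf)))
              · exact Or.inr ((idx4_cons x (y :: t)).mpr (Or.inr hi))
            · rintro (⟨hl, hs⟩ | hi)
              · exact absurd (hs 0 (by omega)) hstep0
              · rcases (idx4_cons x (y :: t)).mp hi with ⟨_, h0, _⟩ | hi2
                · exact absurd h0 hstep0
                · exact Or.inr hi2

-- in a strictly increasing list, positions with equal entries coincide
lemma getD_inj {l : List Int} (hlt : l.Pairwise (· < ·)) {i j : Nat}
    (hi : i < l.length) (hj : j < l.length) (h : l.getD i 0 = l.getD j 0) : i = j := by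
  have hp := List.pairwise_iff_getElem.mp hlt
  rcases lt_trichotomy i j with hlt' | he | hgt
  · have := hp i j hi hj hlt'
    rw [List.getD_eq_getElem l 0 hi, List.getD_eq_getElem l 0 hj] at h
    omega
  · exact he
  · have := hp j i hj hi hgt
    rw [List.getD_eq_getElem l 0 hi, List.getD_eq_getElem l 0 hj] at h
    omega

-- in a strictly increasing list, y and y+1 present means they are adjacent
lemma adjacent_of_mem {l : List Int} (hlt : l.Pairwise (· < ·)) {a : Int}
    (ha : a ∈ l) (hb : a + 1 ∈ l) :
    ∃ i : Nat, i + 1 < l.length ∧ l.getD i 0 = a ∧ l.getD (i + 1) 0 = a + 1 := by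
  obtain ⟨i, hi, hia⟩ := List.mem_iff_getElem.mp ha
  obtain ⟨j, hj, hjb⟩ := List.mem_iff_getElem.mp hb
  have hp := List.pairwise_iff_getElem.mp hlt
  have hij : i < j := by
    rcases lt_trichotomy i j with h' | h' | h'
    · exact h'
    · subst h'; omega
    · have := hp j i hj hi h'; omega
  have hj1 : j = i + 1 := by
    by_contra hne
    have h1 : i + 1 < j := by omega
    have hi1 : i + 1 < l.length := by omega
    have ha1 := hp i (i + 1) hi hi1 (by omega)
    have ha2 := hp (i + 1) j hi1 hj h1
    omega
  subst hj1
  exact ⟨i, by omega, by rw [List.getD_eq_getElem l 0 hi]; exact hia,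
    by rw [List.getD_eq_getElem l 0 hj]; exact hjb⟩

lemma idx4_iff_mem_chain {l : List Int} (hlt : l.Pairwise (· < ·)) :
    idx4 l ↔ ∃ y ∈ l, y + 1 ∈ l ∧ y + 2 ∈ l ∧ y + 3 ∈ l := by
  constructor
  · rintro ⟨i, hlen, h0, h1, h2⟩
    have h0' : l.getD (i + 1) 0 = l.getD i 0 + 1 := h0
    have h1' : l.getD (i + 2) 0 = l.getD (i + 1) 0 + 1 := h1
    have h2' : l.getD (i + 3) 0 = l.getD (i + 2) 0 + 1 := h2
    refine ⟨l.getD i 0, ?_, ?_, ?_, ?_⟩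
    · rw [List.getD_eq_getElem l 0 (by omega)]; exact List.getElem_mem _
    · have e : l.getD (i + 1) 0 = l.getD i 0 + 1 := h0'
      rw [← e, List.getD_eq_getElem l 0 (by omega)]; exact List.getElem_mem _
    · have e : l.getD (i + 2) 0 = l.getD i 0 + 2 := by omega
      rw [← e, List.getD_eq_getElem l 0 (by omega)]; exact List.getElem_mem _
    · have e : l.getD (i + 3) 0 = l.getD i 0 + 3 := by omega
      rw [← e, List.getD_eq_getElem l 0 (by omega)]; exact List.getElem_mem _
  · rintro ⟨y, hy, h1, h2, h3⟩
    obtain ⟨i, hi, hia, hib⟩ := adjacent_of_mem hlt hy h1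
    obtain ⟨j, hj, hja, hjb⟩ := adjacent_of_mem hlt h1
      (by rw [show y + 1 + 1 = y + 2 by ring]; exact h2)
    obtain ⟨k, hk, hka, hkb⟩ := adjacent_of_mem hlt h2
      (by rw [show y + 2 + 1 = y + 3 by ring]; exact h3)
    have hji : j = i + 1 := getD_inj hlt (by omega) (by omega) (hja.trans hib.symm)
    subst hji
    have hjb2 : l.getD (i + 2) 0 = y + 2 := by
      rw [show y + 2 = y + 1 + 1 by ring]; exact hjb
    have hkj : k = i + 2 := getD_inj hlt (by omega) (by omega) (hka.trans hjb2.symm)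
    subst hkj
    have hkb2 : l.getD (i + 3) 0 = y + 3 := by
      rw [show y + 3 = y + 2 + 1 by ring]; exact hkb
    refine ⟨i, by omega, ?_, ?_, ?_⟩
    · show l.getD (i + 1) 0 = l.getD i 0 + 1
      rw [hib, hia]
    · show l.getD (i + 2) 0 = l.getD (i + 1) 0 + 1
      rw [hjb2, hib]; ring
    · show l.getD (i + 3) 0 = l.getD (i + 2) 0 + 1
      rw [hkb2, hjb2]; ring

-- ===== VERDICT (by name: the statement is the Claim_ definition above) =====
theorem has_more_than_3_consecutive_years_spec : Claim_equal_has_more_than_3_consecutive_years := by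
  intro years_set current_year hdom hpre
  unfold Spec_has_more_than_3_consecutive_years
  unfold has_more_than_3_consecutive_years has_more_than_3_consecutive_years_alt
  dsimp only
  set s := PySem.Set.union years_set [current_year] with hs
  set l := PySem.List.sorted s (fun x => x) false with hl
  have hnodup : s.Nodup := PySem.Set.nodup_union years_set [current_year] hpre
  have hslt : l.Pairwise (· < ·) := by
    have hp := PySem.List.sorted_pairwise s (fun x => x)
    have hn : l.Nodup := (PySem.List.sorted_perm s (fun x => x) false).nodup_iff.mpr hnodup
    exact (hp.and hn).imp (fun h => lt_of_le_of_ne h.1 h.2)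
  have hrange := pyRange_fold_eq_zip_fold l l 0 (by simp)
    (fun st p c => bodyA st p c) (false, 1)
  simp only [Nat.cast_zero, zero_add] at hrange
  have hA : (PySem.List.pyRange 1 (PySem.List.len l) 1).foldl
      (fun (st : Bool × Int) i =>
        if st.1 then st
        else if PySem.List.pyGetD l i 0 == PySem.List.pyGetD l (i - 1) 0 + 1 then
          (decide (st.2 + 1 > 3), st.2 + 1)
        else (false, 1)) (false, 1)
      = (l.zip l.tail).foldl (fun st q => bodyA st q.1 q.2) (false, 1) := by
    rw [← hrange]; rfl
  rw [hA, foldl_bodyA_eq_scanPairs]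
  have h1 : (1 : Int) = 4 - ((3 : Nat) : Int) := by norm_num
  rw [Bool.eq_iff_iff, h1, scanPairs_iff l 3 (by omega) (by omega)]
  have hAiff : (firstSteps l 3 ∨ idx4 l) ↔ idx4 l :=
    ⟨fun h => h.elim idx4_of_firstSteps3 id, Or.inr⟩
  rw [hAiff, idx4_iff_mem_chain hslt]
  rw [List.any_eq_true]
  constructor
  · rintro ⟨y, hy, h1', h2', h3'⟩
    refine ⟨y, (PySem.List.mem_sorted ..).mp hy, ?_⟩
    simp only [Bool.and_eq_true, PySem.Set.contains_iff]
    exact ⟨⟨(PySem.List.mem_sorted ..).mp h1', (PySem.List.mem_sorted ..).mp h2'⟩,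
      (PySem.List.mem_sorted ..).mp h3'⟩
  · rintro ⟨y, hy, hp'⟩
    simp only [Bool.and_eq_true, PySem.Set.contains_iff] at hp'
    exact ⟨y, (PySem.List.mem_sorted ..).mpr hy, (PySem.List.mem_sorted ..).mpr hp'.1.1,
      (PySem.List.mem_sorted ..).mpr hp'.1.2, (PySem.List.mem_sorted ..).mpr hp'.2⟩
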